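-- pv_equiv track=rewrite | github.com/rbaudu/angel-interactive-assistant-enhanced | connectors/weather_connector.py | _get_alert_severity
-- ===== SOURCE A (Python) =====
-- def _get_alert_severity(alert_type: str) -> int:
--     """
--     Détermine la gravité d'une alerte météo
--
--     Args:
--         alert_type (str): Type d'alerte
--
--     Returns:
--         int: Niveau de gravité (1-3)
--     """
--     # Alertes de haute gravité
--     high_severity = ["TORNADO", "HURRICANE", "TSUNAMI", "EARTHQUAKE", "FLOOD", "THUNDERSTORM"]
--
--     # Alertes de gravité moyenne
--     medium_severity = ["RAIN", "WIND", "SNOW", "FOG", "EXTREME_TEMPERATURE", "COASTAL"]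
--
--     # Normaliser le type d'alerte
--     normalized_type = alert_type.upper().strip()
--
--     # Vérifier la gravité
--     for alert in high_severity:
--         if alert in normalized_type:
--             return 3
--
--     for alert in medium_severity:
--         if alert in normalized_type:
--             return 2
--
--     # Par défaut, gravité faible
--     return 1
-- ===== SOURCE B (Python) =====
-- HIGH = ("TORNADO", "HURRICANE", "TSUNAMI", "EARTHQUAKE", "FLOOD", "THUNDERSTORM")
-- MEDIUM = ("RAIN", "WIND", "SNOW", "FOG", "EXTREME_TEMPERATURE", "COASTAL")
--
--
-- def _get_alert_severity(alert_type: str) -> int: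
--     # Single left-to-right sweep over the normalized string: at each position,
--     # test whether some keyword STARTS there (no per-keyword substring search).
--     s = alert_type.upper().strip()
--     best = 1
--     for i in range(len(s)):
--         if s.startswith(HIGH, i):
--             return 3
--         if s.startswith(MEDIUM, i):
--             best = 2
--     return best
-- ===== Notes on version B (the rewrite author's own statement) =====
-- stated objective: alternative
-- what changed: Replaces A's per-keyword substring searches over two priority lists by a single left-to-right positional sweep of the normalized string that tests at each index whether any high/medium keyword starts there (str.startswith with an offset), returning 3 on a high match and tracking a best accumulator otherwise; it trades per-keyword library substring search for one explicit position scan.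
import Mathlib
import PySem

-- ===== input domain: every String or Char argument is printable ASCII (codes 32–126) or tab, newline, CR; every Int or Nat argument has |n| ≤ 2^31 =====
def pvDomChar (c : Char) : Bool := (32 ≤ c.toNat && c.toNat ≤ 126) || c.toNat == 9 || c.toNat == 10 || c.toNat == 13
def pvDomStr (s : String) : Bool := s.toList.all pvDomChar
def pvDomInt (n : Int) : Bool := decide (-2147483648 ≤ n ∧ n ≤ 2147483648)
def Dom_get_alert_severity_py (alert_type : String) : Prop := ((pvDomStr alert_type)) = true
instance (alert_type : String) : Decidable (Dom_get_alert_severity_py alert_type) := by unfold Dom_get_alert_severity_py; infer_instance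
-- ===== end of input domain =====

-- B replaces A's per-keyword substring searches by one positional sweep of the
-- normalized string (at each index, test which keyword starts there); objective: alternative.

-- ===== PORT A =====
-- A: two ordered lists; first match in the high list returns 3, else first in the
-- medium list returns 2, else 1; the early-return loops are List.find? over the lists.
def get_alert_severity_py (alert_type : String) : Int :=
  let high_severity := ["TORNADO", "HURRICANE", "TSUNAMI", "EARTHQUAKE", "FLOOD", "THUNDERSTORM"]
  let medium_severity := ["RAIN", "WIND", "SNOW", "FOG", "EXTREME_TEMPERATURE", "COASTAL"]
  let normalized_type := PySem.Str.strip (PySem.Str.upper alert_type)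
  match high_severity.find? (fun alert => PySem.Str.isIn alert normalized_type) with
  | some _ => 3
  | none =>
    match medium_severity.find? (fun alert => PySem.Str.isIn alert normalized_type) with
    | some _ => 2
    | none => 1

-- ===== PORT B =====
-- B's keyword tuples, as lists of code points.
def pvHigh : List (List Char) :=
  ["TORNADO".toList, "HURRICANE".toList, "TSUNAMI".toList,
   "EARTHQUAKE".toList, "FLOOD".toList, "THUNDERSTORM".toList]
def pvMedium : List (List Char) :=
  ["RAIN".toList, "WIND".toList, "SNOW".toList,
   "FOG".toList, "EXTREME_TEMPERATURE".toList, "COASTAL".toList]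

-- B's loop over positions i = 0 .. len(s)-1, transcribed as recursion over the
-- successive suffixes s.drop i; `s.startswith(tuple, i)` is `any isPrefixOf` on the suffix.
def pvSweep : List Char → Int → Int
  | [], best => best
  | c :: rest, best =>
    if pvHigh.any (fun k => k.isPrefixOf (c :: rest)) then 3
    else pvSweep rest (if pvMedium.any (fun k => k.isPrefixOf (c :: rest)) then 2 else best)

def get_alert_severity_py_alt (alert_type : String) : Int :=
  let s := PySem.Str.strip (PySem.Str.upper alert_type)
  pvSweep s.toList 1

-- ===== PRECONDITION & SPEC =====
def Spec_get_alert_severity_py (alert_type : String) (out : Int) : Prop := out = get_alert_severity_py_alt alert_type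
instance (alert_type : String) (out : Int) : Decidable (Spec_get_alert_severity_py alert_type out) := by unfold Spec_get_alert_severity_py; infer_instance

-- ===== CLAIM (what is proved, stated in full; the proofs are below) =====
def Claim_equal_get_alert_severity_py : Prop := ∀ (alert_type : String), Dom_get_alert_severity_py alert_type → Spec_get_alert_severity_py alert_type (get_alert_severity_py alert_type)

-- ===== LEMMAS AND PROOFS =====

-- `sub in s` steps across one character: it is a prefix match here or a match in the tail.
theorem pv_isIn_cons (k : List Char) (c : Char) (rest : List Char) :
    PySem.Chars.isIn k (c :: rest) = (k.isPrefixOf (c :: rest) || PySem.Chars.isIn k rest) := by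
  rcases h : (k.isPrefixOf (c :: rest) || PySem.Chars.isIn k rest) with _ | _
  · simp only [Bool.or_eq_false_iff] at h
    rw [PySem.Chars.isIn_eq_false_iff]
    intro hinf
    rcases List.infix_cons_iff.mp hinf with hp | hi
    · exact absurd ((List.isPrefixOf_iff_prefix).mpr hp) (by simp [h.1])
    · exact absurd ((PySem.Chars.isIn_iff_infix k rest).mpr hi) (by simp [h.2])
  · rw [PySem.Chars.isIn_iff_infix]
    rcases Bool.or_eq_true_iff.mp h with hp | hi
    · exact List.infix_cons_iff.mpr (Or.inl ((List.isPrefixOf_iff_prefix).mp hp))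
    · exact List.infix_cons_iff.mpr (Or.inr ((PySem.Chars.isIn_iff_infix k rest).mp hi))

theorem pv_any_or {α : Type} (L : List α) (f g : α → Bool) :
    L.any (fun x => f x || g x) = (L.any f || L.any g) := by
  induction L with
  | nil => rfl
  | cons a t ih =>
    simp only [List.any_cons, ih]
    cases f a <;> cases g a <;> cases t.any f <;> cases t.any g <;> rfl

-- the sweep computes: 3 if any high keyword occurs, else 2 if any medium one, else best
theorem pv_sweep_eq (cs : List Char) : ∀ best : Int,
    pvSweep cs best =
      if pvHigh.any (fun k => PySem.Chars.isIn k cs) then 3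
      else if pvMedium.any (fun k => PySem.Chars.isIn k cs) then 2 else best := by
  induction cs with
  | nil =>
    intro best
    have h1 : pvHigh.any (fun k => PySem.Chars.isIn k ([] : List Char)) = false := by decide
    have h2 : pvMedium.any (fun k => PySem.Chars.isIn k ([] : List Char)) = false := by decide
    rw [h1, h2]; rfl
  | cons c rest ih =>
    intro best
    have hH : pvHigh.any (fun k => PySem.Chars.isIn k (c :: rest))
        = (pvHigh.any (fun k => k.isPrefixOf (c :: rest)) || pvHigh.any (fun k => PySem.Chars.isIn k rest)) := by
      simp only [pv_isIn_cons]; rw [pv_any_or]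
    have hM : pvMedium.any (fun k => PySem.Chars.isIn k (c :: rest))
        = (pvMedium.any (fun k => k.isPrefixOf (c :: rest)) || pvMedium.any (fun k => PySem.Chars.isIn k rest)) := by
      simp only [pv_isIn_cons]; rw [pv_any_or]
    simp only [pvSweep, hH, hM, ih]
    cases pvHigh.any (fun k => k.isPrefixOf (c :: rest)) <;>
      cases pvHigh.any (fun k => PySem.Chars.isIn k rest) <;>
      cases pvMedium.any (fun k => k.isPrefixOf (c :: rest)) <;>
      cases pvMedium.any (fun k => PySem.Chars.isIn k rest) <;> simp

-- find?-based early return over a keyword list equals `any`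
theorem pv_find?_isSome {α : Type} (L : List α) (p : α → Bool) :
    (L.find? p).isSome = L.any p := by
  induction L with
  | nil => rfl
  | cons a t ih => by_cases h : p a <;> simp [h, ih]

-- ===== VERDICT (by name: the statement is the Claim_ definition above) =====
theorem get_alert_severity_py_spec : Claim_equal_get_alert_severity_py := by
  intro s _
  unfold Spec_get_alert_severity_py get_alert_severity_py get_alert_severity_py_alt
  set n := PySem.Str.strip (PySem.Str.upper s) with hn
  rw [pv_sweep_eq]
  have hH : pvHigh.any (fun k => PySem.Chars.isIn k n.toList)
      = (["TORNADO", "HURRICANE", "TSUNAMI", "EARTHQUAKE", "FLOOD", "THUNDERSTORM"].find?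
          (fun alert => PySem.Str.isIn alert n)).isSome := by
    rw [pv_find?_isSome]
    simp only [pvHigh, List.any_cons, List.any_nil, PySem.Str.isIn_eq]
  have hM : pvMedium.any (fun k => PySem.Chars.isIn k n.toList)
      = (["RAIN", "WIND", "SNOW", "FOG", "EXTREME_TEMPERATURE", "COASTAL"].find?
          (fun alert => PySem.Str.isIn alert n)).isSome := by
    rw [pv_find?_isSome]
    simp only [pvMedium, List.any_cons, List.any_nil, PySem.Str.isIn_eq]
  rw [hH, hM]
  rcases h1 : (["TORNADO", "HURRICANE", "TSUNAMI", "EARTHQUAKE", "FLOOD", "THUNDERSTORM"].find?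
      (fun alert => PySem.Str.isIn alert n)) with _ | _ <;>
    rcases h2 : (["RAIN", "WIND", "SNOW", "FOG", "EXTREME_TEMPERATURE", "COASTAL"].find?
      (fun alert => PySem.Str.isIn alert n)) with _ | _ <;>
    simp only [h1, h2] <;> rfl
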